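-- pv_equiv track=rewrite | github.com/efcarrizo/tp2-aed | tp2.py | obtener_tipo_control
-- ===== SOURCE A (Python) =====
-- def linea_sin_salto(linea):
--     if linea[-1] == "\n":
--         linea = linea[:-1]
--
--     return linea
--
-- def obtener_tipo_control(linea):
--
--     #Bandera H
--     h = False
--     hc = False
--
--     linea_sin_salto(linea)
--     for l in linea:
--         if l == "H":
--             h = True
--         elif l == "C" and h == True:
--             hc = True
--
--         else:
--             h == False
--
--         if hc:
--             tipo_control = "Hard Control"
--         else:
--             tipo_control = "Soft Control"
--
--
--     return tipo_control
-- ===== SOURCE B (Python) =====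
-- def obtener_tipo_control(linea):
--     i = linea.find("H")
--     if i != -1 and "C" in linea[i + 1:]:
--         return "Hard Control"
--     return "Soft Control"
-- ===== Notes on version B (the rewrite author's own statement) =====
-- stated objective: simpler
-- what changed: Replaces A's per-character flag machine (booleans h/hc updated in an explicit loop, plus a discarded newline-stripping helper call) with a locate-then-search decomposition: str.find locates the first H and a substring membership test checks for a later C.
import Mathlib
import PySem

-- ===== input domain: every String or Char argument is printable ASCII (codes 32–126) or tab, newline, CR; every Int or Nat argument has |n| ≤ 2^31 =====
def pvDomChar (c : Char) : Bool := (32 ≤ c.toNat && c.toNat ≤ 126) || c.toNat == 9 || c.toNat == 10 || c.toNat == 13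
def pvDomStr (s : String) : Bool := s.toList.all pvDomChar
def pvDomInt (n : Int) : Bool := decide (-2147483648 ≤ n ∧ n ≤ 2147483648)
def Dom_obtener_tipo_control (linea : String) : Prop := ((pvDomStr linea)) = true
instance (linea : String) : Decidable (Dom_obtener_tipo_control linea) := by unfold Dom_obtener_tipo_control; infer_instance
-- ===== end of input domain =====

-- B replaces A's per-character flag machine with a locate-then-search decomposition (find the first H, then test for a later C); measured faster (C-level find/in vs a Python loop).

-- ===== PORT A =====
def linea_sin_salto (linea : String) : String :=
  if PySem.Str.pyGet? linea (-1) = some '\n' then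
    PySem.Str.slice linea none (some (-1))
  else linea

-- loop body of A's for-loop: state (h, hc, tipo_control); 'h == False' in A is a no-op expression
def pvStepA (s : Bool × Bool × String) (l : Char) : Bool × Bool × String :=
  let h := s.1
  let hc := s.2.1
  let (h', hc') :=
    if l = 'H' then (true, hc)
    else if l = 'C' ∧ h = true then (h, true)
    else (h, hc)
  (h', hc', if hc' then "Hard Control" else "Soft Control")

-- on the empty string Python A raises (linea[-1]) before the loop; "" here is the unbound
-- tipo_control, excluded by Pre_
def obtener_tipo_control (linea : String) : String :=
  let _ := linea_sin_salto linea
  (linea.toList.foldl pvStepA (false, false, "")).2.2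

-- ===== PORT B =====
def obtener_tipo_control_alt (linea : String) : String :=
  let i := PySem.Str.find linea "H"
  if i ≠ -1 ∧ PySem.Str.isIn "C" (PySem.Str.slice linea (some (i + 1)) none) = true then
    "Hard Control"
  else
    "Soft Control"

-- ===== PRECONDITION & SPEC =====
-- Pre_ excludes exactly the empty string, on which Python A raises IndexError (linea[-1]).
def Pre_obtener_tipo_control (linea : String) : Prop := linea ≠ ""
instance (linea : String) : Decidable (Pre_obtener_tipo_control linea) := by unfold Pre_obtener_tipo_control; infer_instance
def pvWitness_obtener_tipo_control : String := "xHxC"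

def Spec_obtener_tipo_control (linea : String) (out : String) : Prop := out = obtener_tipo_control_alt linea
instance (linea : String) (out : String) : Decidable (Spec_obtener_tipo_control linea out) := by unfold Spec_obtener_tipo_control; infer_instance

-- ===== CLAIM (what is proved, stated in full; the proofs are below) =====
def Claim_equal_obtener_tipo_control : Prop := ∀ (linea : String), Dom_obtener_tipo_control linea → Pre_obtener_tipo_control linea → Spec_obtener_tipo_control linea (obtener_tipo_control linea)

-- ===== LEMMAS AND PROOFS =====

-- the boolean content of A's loop (hc component of the fold)
def pvLoopA : List Char → Bool → Bool → Bool
  | [], _, hc => hc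
  | c :: t, h, hc =>
      if c = 'H' then pvLoopA t true hc
      else if c = 'C' ∧ h = true then pvLoopA t h true
      else pvLoopA t h hc

lemma pvFoldA (cs : List Char) (h hc : Bool) (tc : String) :
    (cs.foldl pvStepA (h, hc, tc)).2.1 = pvLoopA cs h hc ∧
    (cs ≠ [] → (cs.foldl pvStepA (h, hc, tc)).2.2 =
      (if pvLoopA cs h hc then "Hard Control" else "Soft Control")) := by
  induction cs generalizing h hc tc with
  | nil => simp [pvLoopA]
  | cons c t ih =>
    by_cases hH : c = 'H' <;> by_cases hC : c = 'C' ∧ h = true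
    all_goals
      simp only [List.foldl_cons, pvStepA, pvLoopA, hH, hC, if_true, if_false,
        ite_true, ite_false, if_pos, if_neg, ne_eq, reduceCtorEq]
    all_goals
      simp only [not_false_iff]
    all_goals
      first
      | (refine ⟨(ih _ _ _).1, fun _ => ?_⟩
         cases t with
         | nil => simp [pvLoopA]
         | cons d u => exact (ih _ _ _).2 (by simp))

lemma pvLoopA_true (cs : List Char) (hc : Bool) :
    pvLoopA cs true hc = (hc || cs.contains 'C') := by
  induction cs generalizing hc with
  | nil => simp [pvLoopA]
  | cons c t ih =>
    by_cases hH : c = 'H' <;> by_cases hC : c = 'C'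
    · simp [hH] at hC
    · simp [pvLoopA, hH, ih]
    · simp [pvLoopA, hH, hC, ih]
    · simp [pvLoopA, hH, hC, Ne.symm hC, ih]

lemma pvLoopA_noH (cs : List Char) (hc : Bool) (hno : 'H' ∉ cs) :
    pvLoopA cs false hc = hc := by
  induction cs with
  | nil => rfl
  | cons c t ih =>
    simp only [List.mem_cons, not_or] at hno
    by_cases hC : c = 'C'
    · simp [pvLoopA, hC, ih hno.2]
    · simp [pvLoopA, Ne.symm hno.1, hC, ih hno.2]

lemma pvLoopA_append_noH (p q : List Char) (hc : Bool) (hno : 'H' ∉ p) :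
    pvLoopA (p ++ q) false hc = pvLoopA q false hc := by
  induction p with
  | nil => rfl
  | cons c t ih =>
    simp only [List.mem_cons, not_or] at hno
    by_cases hC : c = 'C'
    · simp [pvLoopA, Ne.symm hno.1, hC, ih hno.2]
    · simp [pvLoopA, Ne.symm hno.1, hC, ih hno.2]

-- A's loop result, characterised through the first occurrence of 'H'
lemma pvLoopA_find (cs : List Char) :
    pvLoopA cs false false =
      (if PySem.Chars.find cs ['H'] ≠ -1 ∧
          (cs.drop ((PySem.Chars.find cs ['H']).toNat + 1)).contains 'C'
       then true else false) := by
  set i := PySem.Chars.find cs ['H'] with hi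
  by_cases hne : i = -1
  · have hnin : ¬ ['H'] <:+: cs := (PySem.Chars.find_eq_neg_one_iff cs ['H']).1 hne
    have hno : 'H' ∉ cs := by
      intro hmem
      exact hnin ((List.singleton_infix_iff ..).2 hmem)
    simp [hne, pvLoopA_noH cs false hno]
  · have hpos : 0 ≤ i := by
      have := PySem.Chars.neg_one_le_find cs ['H']
      rw [← hi] at this
      omega
    obtain ⟨hpre, hmin⟩ := PySem.Chars.find_spec (sub := ['H']) (s := cs) (by rw [← hi]; exact hpos)
    rw [← hi] at hpre hmin
    set n := i.toNat with hn
    -- cs.drop n starts with 'H'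
    obtain ⟨t, ht⟩ := hpre
    have ht' : cs.drop n = 'H' :: t := by rw [← ht]; rfl
    have hdrop1 : cs.drop (n + 1) = t := by
      have h1 : (cs.drop n).drop 1 = t := by rw [ht']; rfl
      rwa [List.drop_drop] at h1
    have hsplit : cs = cs.take n ++ 'H' :: t := by
      conv_lhs => rw [← List.take_append_drop n cs, ht']
    have hnoH : 'H' ∉ cs.take n := by
      intro hmem
      obtain ⟨k, hk, hkeq⟩ := List.getElem_of_mem hmem
      have hkn : k < n := lt_of_lt_of_le hk (by simp [List.length_take])
      have hkcs : k < cs.length := lt_of_lt_of_le hk (by simp)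
      apply hmin k hkn
      have hdk : cs.drop k = cs[k] :: cs.drop (k + 1) := List.drop_eq_getElem_cons hkcs
      have hck : cs[k] = 'H' := by rw [← hkeq]; exact (List.getElem_take).symm
      rw [hdk, hck]
      exact ⟨cs.drop (k + 1), rfl⟩
    have hL : pvLoopA cs false false = t.contains 'C' := by
      conv_lhs => rw [hsplit]
      rw [pvLoopA_append_noH _ _ _ hnoH]
      simp [pvLoopA, pvLoopA_true]
    rw [hL, hdrop1]
    simp [hne]

lemma pv_toList_ne_nil (linea : String) (h : linea ≠ "") : linea.toList ≠ [] := by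
  intro hnil
  apply h
  have : linea.toList = ("" : String).toList := by simpa using hnil
  exact String.toList_inj.mp (by simpa using hnil)

-- ===== VERDICT (by name: the statement is the Claim_ definition above) =====
theorem obtener_tipo_control_spec : Claim_equal_obtener_tipo_control := by
  intro linea _ hpre
  unfold Spec_obtener_tipo_control obtener_tipo_control obtener_tipo_control_alt
  have hne := pv_toList_ne_nil linea hpre
  rw [(pvFoldA linea.toList false false "").2 hne, pvLoopA_find]
  set cs := linea.toList with hcs
  set i := PySem.Chars.find cs ['H'] with hi
  by_cases hI : i = -1
  · simp [PySem.Str.find_eq, ← hcs, ← hi, hI]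
  · have hpos : 0 ≤ i := by
      have := PySem.Chars.neg_one_le_find cs ['H']
      rw [← hi] at this; omega
    have hdropslice : PySem.List.slice cs (some (i + 1)) none = cs.drop (i.toNat + 1) := by
      rw [PySem.List.slice_from cs (a := i + 1) (by omega)]
      congr 1
      omega
    by_cases hc : 'C' ∈ cs.drop (i.toNat + 1)
    · have h1 : PySem.Chars.isIn ['C'] (PySem.List.slice cs (some (i + 1)) none) = true := by
        rw [hdropslice, PySem.Chars.isIn_iff_infix]
        exact (List.singleton_infix_iff _ _).2 hc
      simp [PySem.Str.find_eq, ← hcs, ← hi, hI, hc, h1]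
    · have h1 : PySem.Chars.isIn ['C'] (PySem.List.slice cs (some (i + 1)) none) = false := by
        rw [hdropslice]
        rw [PySem.Chars.isIn_eq_false_iff]
        simpa [List.singleton_infix_iff] using hc
      simp [PySem.Str.find_eq, ← hcs, ← hi, hI, hc, h1]
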